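-- pv_equiv track=rewrite | github.com/LubinRld/Teacherdle | create_widget.py | create_color
-- ===== SOURCE A (Python) =====
-- def create_color(info, answer):
--     bg = "#ff6666"  # rouge clair
--     infos_split = info.split()
--     answer_split = answer.split()
--     split = sum(1 for k in infos_split for l in answer_split if k == l)
--     if split > 0:
--         bg = "#ffa500"  # orange
--     if info == answer:
--         bg = "#66ff66"  # vert clair
--     return bg
-- ===== SOURCE B (Python) =====
-- def create_color(info, answer):
--     if info == answer:
--         return "#66ff66"
--     if set(info.split()) & set(answer.split()):
--         return "#ffa500"
--     return "#ff6666"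
-- ===== Notes on version B (the rewrite author's own statement) =====
-- stated objective: alternative
-- what changed: Replaces the O(n*m) nested-loop pair count with a set-intersection non-emptiness test (only existence of a shared word matters), and turns the overwrite chain into early returns.
import Mathlib
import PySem

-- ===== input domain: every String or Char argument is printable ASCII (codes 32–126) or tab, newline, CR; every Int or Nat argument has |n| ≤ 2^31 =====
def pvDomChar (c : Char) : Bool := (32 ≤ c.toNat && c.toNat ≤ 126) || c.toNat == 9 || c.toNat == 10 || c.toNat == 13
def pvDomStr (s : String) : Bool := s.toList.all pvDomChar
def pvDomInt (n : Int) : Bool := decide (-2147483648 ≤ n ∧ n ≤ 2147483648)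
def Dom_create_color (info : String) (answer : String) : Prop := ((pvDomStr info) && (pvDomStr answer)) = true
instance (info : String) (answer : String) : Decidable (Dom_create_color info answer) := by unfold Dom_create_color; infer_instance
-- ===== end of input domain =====

-- B replaces A's nested-loop pair count with a set-intersection non-emptiness test and early returns.


-- ===== PORT A =====
def create_color (info : String) (answer : String) : String :=
  let bg := "#ff6666"
  let infos_split := PySem.Str.split₀ info
  let answer_split := PySem.Str.split₀ answer
  let split : Int := infos_split.foldl
    (fun acc k => answer_split.foldl (fun a l => if k == l then a + 1 else a) acc) 0
  let bg := if split > 0 then "#ffa500" else bg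
  let bg := if info == answer then "#66ff66" else bg
  bg

-- ===== PORT B =====
def create_color_alt (info : String) (answer : String) : String :=
  if info == answer then "#66ff66"
  else if PySem.Set.inter (PySem.Set.ofList (PySem.Str.split₀ info))
          (PySem.Set.ofList (PySem.Str.split₀ answer)) ≠ [] then "#ffa500"
  else "#ff6666"

-- ===== PRECONDITION & SPEC =====
def Spec_create_color (info : String) (answer : String) (out : String) : Prop := out = create_color_alt info answer
instance (info : String) (answer : String) (out : String) : Decidable (Spec_create_color info answer out) := by unfold Spec_create_color; infer_instance

-- ===== CLAIM (what is proved, stated in full; the proofs are below) =====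
def Claim_equal_create_color : Prop := ∀ (info : String) (answer : String), Dom_create_color info answer → Spec_create_color info answer (create_color info answer)

-- ===== LEMMAS AND PROOFS =====

-- the inner loop adds answer_split.count k to the accumulator
theorem inner_foldl_eq (ans : List String) (k : String) (a : Int) :
    ans.foldl (fun a l => if k == l then a + 1 else a) a = a + (ans.count k : Int) := by
  induction ans generalizing a with
  | nil => simp
  | cons x xs ih =>
      rw [List.foldl_cons, ih]
      simp only [List.count_cons, beq_iff_eq]
      by_cases h : k = x
      · subst h; simp; ring
      · simp [h, Ne.symm h]

-- the outer loop sums the per-word counts; it is positive iff a shared word exists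
theorem outer_pos_iff (l ans : List String) (a : Int) (ha : 0 ≤ a) :
    (0 < l.foldl (fun acc k => ans.foldl (fun a l => if k == l then a + 1 else a) acc) a
      ↔ (0 < a ∨ ∃ k ∈ l, k ∈ ans)) := by
  induction l generalizing a with
  | nil => simp
  | cons x xs ih =>
      rw [List.foldl_cons, inner_foldl_eq,
        ih _ (by positivity)]
      have hcnt : (0 < a + (ans.count x : Int)) ↔ (0 < a ∨ x ∈ ans) := by
        rw [← List.count_pos_iff]
        omega
      simp only [List.mem_cons]
      constructor
      · rintro (h | ⟨k, hk, hka⟩)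
        · rcases hcnt.mp h with h' | h'
          · exact Or.inl h'
          · exact Or.inr ⟨x, Or.inl rfl, h'⟩
        · exact Or.inr ⟨k, Or.inr hk, hka⟩
      · rintro (h | ⟨k, (rfl | hk), hka⟩)
        · exact Or.inl (hcnt.mpr (Or.inl h))
        · exact Or.inl (hcnt.mpr (Or.inr hka))
        · exact Or.inr ⟨k, hk, hka⟩

theorem inter_ne_nil_iff (xs ys : List String) :
    (PySem.Set.inter (PySem.Set.ofList xs) (PySem.Set.ofList ys) ≠ []) ↔ ∃ k ∈ xs, k ∈ ys := by
  rw [← List.isEmpty_eq_false_iff, List.isEmpty_eq_false_iff_exists_mem]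
  constructor
  · rintro ⟨k, hk⟩
    rw [PySem.Set.mem_inter, PySem.Set.mem_ofList, PySem.Set.mem_ofList] at hk
    exact ⟨k, hk.1, hk.2⟩
  · rintro ⟨k, h1, h2⟩
    exact ⟨k, by rw [PySem.Set.mem_inter, PySem.Set.mem_ofList, PySem.Set.mem_ofList]; exact ⟨h1, h2⟩⟩

-- ===== VERDICT (by name: the statement is the Claim_ definition above) =====
theorem create_color_spec : Claim_equal_create_color := by
  intro info answer _
  unfold Spec_create_color
  have key : (0 < (PySem.Str.split₀ info).foldl
        (fun acc k => (PySem.Str.split₀ answer).foldl (fun a l => if k == l then a + 1 else a) acc) (0 : Int))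
      ↔ (PySem.Set.inter (PySem.Set.ofList (PySem.Str.split₀ info))
          (PySem.Set.ofList (PySem.Str.split₀ answer)) ≠ []) := by
    rw [outer_pos_iff _ _ 0 le_rfl, inter_ne_nil_iff]
    simp
  simp only [create_color, create_color_alt, gt_iff_lt, beq_iff_eq]
  split_ifs <;> simp_all
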